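-- pv_equiv track=rewrite | github.com/williamburbatt/Python | playfair/playfair.py | check_duplicates
-- ===== SOURCE A (Python) =====
-- def check_duplicates(oldString):
--     newString = ""
--     prev = ""
--     strLen = len(oldString)
--     for i in range(strLen):
--         letter = oldString[i]
--         if (letter == prev):
--             if (letter == "X"):
--                 newString = newString + "Q" + letter
--             else:
--                 newString = newString + "X" + letter
--         else:
--             newString = newString + letter
--         prev = letter
--     return newString
-- ===== SOURCE B (Python) =====
-- from itertools import groupby
--
-- def check_duplicates(oldString):
--     parts = []
--     for letter, group in groupby(oldString):
--         count = sum(1 for _ in group)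
--         sep = "Q" if letter == "X" else "X"
--         parts.append(letter + (sep + letter) * (count - 1))
--     return "".join(parts)
-- ===== Notes on version B (the rewrite author's own statement) =====
-- stated objective: faster
-- what changed: Replaces the index-based prev-tracking state machine that rebuilds the string by repeated concatenation with an itertools.groupby run-length traversal that emits each maximal run as letter + (sep+letter)*(count-1) and joins once.
import Mathlib
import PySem

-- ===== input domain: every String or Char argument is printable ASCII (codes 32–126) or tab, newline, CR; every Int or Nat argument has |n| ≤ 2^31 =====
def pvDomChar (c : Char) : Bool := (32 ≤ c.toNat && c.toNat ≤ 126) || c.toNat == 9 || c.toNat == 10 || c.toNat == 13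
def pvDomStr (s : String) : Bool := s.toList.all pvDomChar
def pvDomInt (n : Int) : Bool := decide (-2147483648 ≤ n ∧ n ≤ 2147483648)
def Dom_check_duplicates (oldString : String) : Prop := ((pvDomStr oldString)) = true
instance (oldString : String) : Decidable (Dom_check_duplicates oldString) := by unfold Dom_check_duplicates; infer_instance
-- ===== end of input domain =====

-- B replaces A's index-based prev-tracking state machine with a run-length (groupby) traversal; idiomatic restructuring, same values.


-- ===== PORT A =====
-- A iterates over the characters in order (for i in range(len)), comparing each to the
-- previous one (prev = "" initially, modelled as Option Char: none = no previous letter),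
-- appending "Q"+letter or "X"+letter on a duplicate, else the letter. Strings are handled
-- as their character lists (exact on the ASCII domain).
def checkDupLoop : List Char → Option Char → List Char
  | [], _ => []
  | letter :: rest, prev =>
      (if some letter = prev then
        (if letter = 'X' then ['Q', letter] else ['X', letter])
      else [letter]) ++ checkDupLoop rest (some letter)

def check_duplicates (oldString : String) : String :=
  String.mk (checkDupLoop oldString.toList none)

-- ===== PORT B =====
-- countRun c xs = (length of the leading run of c in xs, the remainder) — the work
-- groupby's group iterator does for one key.
def countRun (c : Char) : List Char → Nat × List Char
  | [] => (0, [])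
  | x :: rest =>
      if x = c then
        let p := countRun c rest
        (p.1 + 1, p.2)
      else (0, x :: rest)

theorem countRun_snd_length (c : Char) (xs : List Char) :
    (countRun c xs).2.length ≤ xs.length := by
  induction xs with
  | nil => simp [countRun]
  | cons x rest ih =>
      simp only [countRun]
      split
      · simpa using Nat.le_succ_of_le ih
      · simp

-- runsOf = list(groupby(s)) as (letter, count) pairs.
def runsOf : List Char → List (Char × Nat)
  | [] => []
  | c :: rest =>
      let p := countRun c rest
      (c, p.1 + 1) :: runsOf p.2
termination_by xs => xs.length
decreasing_by
  simpa using Nat.lt_succ_of_le (countRun_snd_length c rest)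

-- emitRun (letter, count) = letter + (sep + letter) * (count - 1)
def emitRun (r : Char × Nat) : List Char :=
  r.1 :: (List.replicate (r.2 - 1) [(if r.1 = 'X' then 'Q' else 'X'), r.1]).flatten

def check_duplicates_alt (oldString : String) : String :=
  String.mk ((runsOf oldString.toList).map emitRun).flatten

-- ===== PRECONDITION & SPEC =====
def Spec_check_duplicates (oldString : String) (out : String) : Prop := out = check_duplicates_alt oldString
instance (oldString : String) (out : String) : Decidable (Spec_check_duplicates oldString out) := by unfold Spec_check_duplicates; infer_instance

-- ===== CLAIM (what is proved, stated in full; the proofs are below) =====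
def Claim_equal_check_duplicates : Prop := ∀ (oldString : String), Dom_check_duplicates oldString → Spec_check_duplicates oldString (check_duplicates oldString)

-- ===== LEMMAS AND PROOFS =====

-- Inside a run started by c, A's loop emits one separator pair per remaining duplicate,
-- then continues as B does on the remainder of the run.
theorem checkDupLoop_run (xs : List Char) (c : Char) :
    checkDupLoop xs (some c) =
      (List.replicate (countRun c xs).1 [(if c = 'X' then 'Q' else 'X'), c]).flatten
        ++ ((runsOf (countRun c xs).2).map emitRun).flatten := by
  induction xs generalizing c with
  | nil => simp [checkDupLoop, countRun, runsOf]
  | cons x rest ih =>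
      by_cases hx : x = c
      · subst hx
        simp only [checkDupLoop, countRun]
        rw [ih x]
        split_ifs <;> simp [List.replicate_succ]
      · simp only [checkDupLoop, countRun, if_neg hx,
          if_neg (fun h => hx (Option.some.inj h))]
        rw [ih x]
        simp [runsOf, emitRun]

theorem checkDupLoop_eq (xs : List Char) :
    checkDupLoop xs none = ((runsOf xs).map emitRun).flatten := by
  cases xs with
  | nil => simp [checkDupLoop, runsOf]
  | cons c rest =>
      simp only [checkDupLoop, runsOf]
      rw [checkDupLoop_run rest c]
      simp [emitRun]

-- ===== VERDICT (by name: the statement is the Claim_ definition above) =====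
theorem check_duplicates_spec : Claim_equal_check_duplicates := by
  intro s _
  unfold Spec_check_duplicates check_duplicates check_duplicates_alt
  rw [checkDupLoop_eq]
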